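-- pv_equiv track=rewrite | github.com/Mr-EZO949/CDCL-sat-solver | satsolver/preprocess.py | unit_propagate_fixpoint
-- ===== SOURCE A (Python) =====
-- def unit_propagate_fixpoint(clauses: list[list[int]]) -> list[list[int]] | None:
--     clauses = [list(c) for c in clauses]
--     assigned: dict[int, bool] = {}
--
--     while True:
--         units: list[int] = []
--         new_clauses: list[list[int]] = []
--         satisfied = False
--         for cl in clauses:
--             reduced: list[int] = []
--             sat = False
--             for l in cl:
--                 v = abs(l)
--                 want = l > 0
--                 if v in assigned:
--                     if assigned[v] == want:
--                         sat = True
--                         break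
--                 else:
--                     reduced.append(l)
--             if sat:
--                 continue
--             if not reduced:
--                 return None
--             if len(reduced) == 1:
--                 units.append(reduced[0])
--             new_clauses.append(reduced)
--         clauses = new_clauses
--         if not units:
--             break
--         for u in units:
--             v = abs(u)
--             want = u > 0
--             if v in assigned:
--                 if assigned[v] != want:
--                     return None
--                 continue
--             assigned[v] = want
--
--     return clauses
-- ===== SOURCE B (Python) =====
-- def unit_propagate_fixpoint(clauses: list[list[int]]) -> list[list[int]] | None:
--     # Counter/queue-based unit propagation: occurrence index + per-clause
--     # unassigned-literal counters drive a worklist of unit literals; the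
--     # assignment is computed once, then one filter pass in original order.
--     n = len(clauses)
--     occ: dict[int, list[int]] = {}
--     unassigned: list[int] = []
--     sat = [False] * n
--     queue: list[int] = []
--     for i, cl in enumerate(clauses):
--         unassigned.append(len(cl))
--         for l in cl:
--             occ.setdefault(l, []).append(i)
--         if len(cl) == 0:
--             return None
--         if len(cl) == 1:
--             queue.append(cl[0])
--
--     assigned: dict[int, bool] = {}
--     qi = 0
--     while qi < len(queue):
--         u = queue[qi]
--         qi += 1
--         v, want = abs(u), u > 0
--         if v in assigned:
--             if assigned[v] != want:
--                 return None
--             continue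
--         assigned[v] = want
--         for i in occ.get(u, []):
--             sat[i] = True
--         for i in occ.get(-u, []):
--             if sat[i]:
--                 continue
--             unassigned[i] -= 1
--             if unassigned[i] == 0:
--                 return None
--             if unassigned[i] == 1:
--                 for l in clauses[i]:
--                     if abs(l) not in assigned:
--                         queue.append(l)
--                         break
--
--     result = []
--     for cl in clauses:
--         reduced = []
--         s = False
--         for l in cl:
--             w = assigned.get(abs(l))
--             if w is None:
--                 reduced.append(l)
--             elif w == (l > 0):
--                 s = True
--                 break
--         if not s:
--             result.append(reduced)
--     return result
-- ===== Notes on version B (the rewrite author's own statement) =====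
-- stated objective: alternative
-- what changed: B replaces A's repeated whole-database reduction rounds by counter/queue-based unit propagation: a literal-to-clause occurrence index and per-clause unassigned-literal counters drive a worklist that computes the assignment once, followed by a single filter pass over the original clauses.
import Mathlib
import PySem

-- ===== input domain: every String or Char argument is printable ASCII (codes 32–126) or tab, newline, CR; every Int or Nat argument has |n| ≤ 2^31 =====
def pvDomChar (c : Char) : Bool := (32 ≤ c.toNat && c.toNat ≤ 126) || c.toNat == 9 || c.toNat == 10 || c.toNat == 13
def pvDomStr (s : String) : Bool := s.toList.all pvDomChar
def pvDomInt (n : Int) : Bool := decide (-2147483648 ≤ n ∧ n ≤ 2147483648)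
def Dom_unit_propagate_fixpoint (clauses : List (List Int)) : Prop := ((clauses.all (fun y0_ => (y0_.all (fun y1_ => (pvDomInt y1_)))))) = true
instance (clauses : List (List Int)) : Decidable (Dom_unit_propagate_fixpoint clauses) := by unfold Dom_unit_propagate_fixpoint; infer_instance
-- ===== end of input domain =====

-- B replaces A's round-by-round clause rewriting by counter/queue-based unit propagation
-- (occurrence index + per-clause unassigned counters drive a worklist), then one filter pass.

-- ===== PORT A =====
-- inner literal loop of A: `reduced` accumulator, sat-break = none
def pvRedA (a : PySem.Dict Int Bool) (reduced : List Int) : List Int → Option (List Int)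
  | [] => some reduced
  | l :: rest =>
      match a.get? |l| with
      | some w => if w = decide (0 < l) then none else pvRedA a reduced rest
      | none => pvRedA a (reduced ++ [l]) rest

-- A's per-round clause scan: builds `units` and `new_clauses`; `return None` on an empty reduction
def pvScanA (a : PySem.Dict Int Bool) : List (List Int) → List Int → List (List Int) → Option (List Int × List (List Int))
  | [], units, newcls => some (units, newcls)
  | cl :: rest, units, newcls =>
      match pvRedA a [] cl with
      | none => pvScanA a rest units newcls
      | some reduced =>
          if reduced = [] then none
          else pvScanA a rest (if reduced.length = 1 then units ++ [reduced.headI] else units) (newcls ++ [reduced])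

-- A's `for u in units` assignment loop; conflict = none
def pvApplyA (a : PySem.Dict Int Bool) : List Int → Option (PySem.Dict Int Bool)
  | [] => some a
  | u :: rest =>
      match a.get? |u| with
      | some w => if w ≠ decide (0 < u) then none else pvApplyA a rest
      | none => pvApplyA (a.insert |u| (decide (0 < u))) rest

-- A's `while True` loop; fuel: every continuing round assigns at least one previously
-- unassigned variable of the clauses, so flatten-length + 1 rounds always suffice
def pvLoopA : Nat → List (List Int) → PySem.Dict Int Bool → Option (List (List Int))
  | 0, _, _ => none
  | fuel + 1, clauses, assigned =>
      match pvScanA assigned clauses [] [] with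
      | none => none
      | some (units, newcls) =>
          if units = [] then some newcls
          else
            match pvApplyA assigned units with
            | none => none
            | some a' => pvLoopA fuel newcls a'

def unit_propagate_fixpoint (clauses : List (List Int)) : Option (List (List Int)) :=
  pvLoopA (clauses.flatten.length + 1) clauses PySem.Dict.empty

-- ===== PORT B =====
-- Source B build loop: occurrence index (clause indices, one per literal occurrence),
-- per-clause unassigned counters, initial worklist of unit-clause literals
def pvBuild : List (List Int) → Nat → PySem.Dict Int (List Nat) → List Int → List Int → Option (PySem.Dict Int (List Nat) × List Int × List Int)
  | [], _, occ, cnts, queue => some (occ, cnts, queue)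
  | cl :: rest, i, occ, cnts, queue =>
      let occ' := cl.foldl (fun o l => o.insert l (o.getD l [] ++ [i])) occ
      let cnts' := cnts ++ [(cl.length : Int)]
      if cl.length = 0 then none
      else pvBuild rest (i + 1) occ' cnts' (if cl.length = 1 then queue ++ [cl.headI] else queue)

-- Source B inner `for i in occ.get(-u, [])` loop: decrement counters of non-satisfied
-- clauses, conflict (count 0) = none, new unit (count 1) appends the remaining literal
def pvDec (cls : List (List Int)) (a : PySem.Dict Int Bool) (sat : List Bool) :
    List Int → List Nat → List Int → Option (List Int × List Int)
  | cnt, [], app => some (cnt, app)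
  | cnt, i :: is, app =>
      if sat.getD i false then pvDec cls a sat cnt is app
      else
        let c := cnt.getD i 0 - 1
        let cnt' := cnt.set i c
        if c = 0 then none
        else if c = 1 then
          match (cls.getD i []).find? (fun l => !(a.contains |l|)) with
          | some l => pvDec cls a sat cnt' is (app ++ [l])
          | none => pvDec cls a sat cnt' is app
        else pvDec cls a sat cnt' is app

-- Source B worklist loop (`while qi < len(queue)`): pending = the unprocessed queue suffix
def pvQLoop (cls : List (List Int)) (occ : PySem.Dict Int (List Nat)) :
    Nat → PySem.Dict Int Bool → List Bool → List Int → List Int → Option (PySem.Dict Int Bool)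
  | 0, _, _, _, _ => none
  | _ + 1, a, _, _, [] => some a
  | fuel + 1, a, sat, cnt, u :: rest =>
      match a.get? |u| with
      | some w => if w ≠ decide (0 < u) then none else pvQLoop cls occ fuel a sat cnt rest
      | none =>
          let a' := a.insert |u| (decide (0 < u))
          let sat' := (occ.getD u []).foldl (fun s i => s.set i true) sat
          match pvDec cls a' sat' cnt (occ.getD (-u) []) [] with
          | none => none
          | some (cnt', app) => pvQLoop cls occ fuel a' sat' cnt' (rest ++ app)

-- Source B final pass `reduce` body: `reduced` accumulator, satisfied clause = none
def pvRedB (a : PySem.Dict Int Bool) (out : List Int) : List Int → Option (List Int)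
  | [] => some out
  | l :: rest =>
      match a.get? |l| with
      | none => pvRedB a (out ++ [l]) rest
      | some w => if w = decide (0 < l) then none else pvRedB a out rest

def unit_propagate_fixpoint_alt (clauses : List (List Int)) : Option (List (List Int)) :=
  match pvBuild clauses 0 PySem.Dict.empty [] [] with
  | none => none
  | some (occ, cnts, queue) =>
      match pvQLoop clauses occ (clauses.length + clauses.flatten.length + 1) PySem.Dict.empty
          (List.replicate clauses.length false) cnts queue with
      | none => none
      | some a => some (clauses.filterMap (fun cl => pvRedB a [] cl))

-- ===== PRECONDITION & SPEC =====
def Spec_unit_propagate_fixpoint (clauses : List (List Int)) (out : Option (List (List Int))) : Prop := out = unit_propagate_fixpoint_alt clauses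
instance (clauses : List (List Int)) (out : Option (List (List Int))) : Decidable (Spec_unit_propagate_fixpoint clauses out) := by unfold Spec_unit_propagate_fixpoint; infer_instance

-- ===== CLAIM (what is proved, stated in full; the proofs are below) =====
def Claim_equal_unit_propagate_fixpoint : Prop := ∀ (clauses : List (List Int)), Dom_unit_propagate_fixpoint clauses → Spec_unit_propagate_fixpoint clauses (unit_propagate_fixpoint clauses)

-- ===== LEMMAS AND PROOFS =====

-- ---------- proof-side semantics of clause reduction ----------

-- accumulator-free reduction of one clause
def pvRedL (a : PySem.Dict Int Bool) : List Int → Option (List Int)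
  | [] => some []
  | l :: rest =>
      match a.get? |l| with
      | none => (pvRedL a rest).map (l :: ·)
      | some w => if w = decide (0 < l) then none else pvRedL a rest

-- surviving reduced clauses of a whole list, none = some clause reduces to []
def pvSurv (a : PySem.Dict Int Bool) : List (List Int) → Option (List (List Int))
  | [] => some []
  | cl :: rest =>
      match pvRedL a cl with
      | none => pvSurv a rest
      | some r => if r = [] then none else (pvSurv a rest).map (r :: ·)

-- the unit literals a round extracts from the surviving reduced clauses
def pvUnitsOf (rs : List (List Int)) : List Int :=
  rs.filterMap (fun r => if r.length = 1 then some r.headI else none)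

-- proof-side round loop over the ORIGINAL clause list (semantics of A's while-loop)
def pvRLoop (cls : List (List Int)) : Nat → PySem.Dict Int Bool → Option (PySem.Dict Int Bool)
  | 0, _ => none
  | fuel + 1, a =>
      match pvSurv a cls with
      | none => none
      | some rs =>
          if pvUnitsOf rs = [] then some a
          else
            match pvApplyA a (pvUnitsOf rs) with
            | none => none
            | some a' => pvRLoop cls fuel a'

-- ---------- literal status under an assignment ----------

def pvTrue (a : PySem.Dict Int Bool) (l : Int) : Prop := a.get? |l| = some (decide (0 < l))
def pvFals (a : PySem.Dict Int Bool) (l : Int) : Prop := a.get? |l| = some (!decide (0 < l))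
def pvSatP (a : PySem.Dict Int Bool) (cl : List Int) : Prop := ∃ l ∈ cl, pvTrue a l
def pvCnt (a : PySem.Dict Int Bool) (cl : List Int) : Nat := cl.countP (fun l => !(a.contains |l|))

-- the unit-propagation closure of a clause set
inductive pvForced (cls : List (List Int)) : Int → Bool → Prop
  | intro (cl : List Int) (u : Int) (hcl : cl ∈ cls) (hu : u ∈ cl) (hcount : cl.count u = 1)
      (hprem : ∀ l ∈ cl, l ≠ u → pvForced cls |l| (!decide (0 < l))) :
      pvForced cls |u| (decide (0 < u))

def pvSound (cls : List (List Int)) (a : PySem.Dict Int Bool) : Prop :=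
  ∀ v b, a.get? v = some b → pvForced cls v b

def pvComplete (cls : List (List Int)) (a : PySem.Dict Int Bool) : Prop :=
  ∀ v b, pvForced cls v b → a.get? v = some b

def pvClosed (cls : List (List Int)) (a : PySem.Dict Int Bool) : Prop :=
  ∀ cl ∈ cls, pvSatP a cl ∨ 2 ≤ pvCnt a cl

def pvOk (cls : List (List Int)) : Prop :=
  (∀ v b b', pvForced cls v b → pvForced cls v b' → b = b') ∧
  (∀ cl ∈ cls, ¬ ∀ l ∈ cl, pvForced cls |l| (!decide (0 < l)))

-- ---------- old A-side bridge: A's loop = round loop + final filter ----------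

theorem pvRedB_eq_redL (a : PySem.Dict Int Bool) (cl acc : List Int) :
    pvRedB a acc cl = (pvRedL a cl).map (acc ++ ·) := by
  induction cl generalizing acc with
  | nil => simp [pvRedB, pvRedL]
  | cons l rest ih =>
      simp only [pvRedB, pvRedL]
      cases a.get? |l| with
      | none => rw [ih]; cases pvRedL a rest <;> simp
      | some w =>
          by_cases hw : w = decide (0 < l)
          · simp [hw]
          · simp only [if_neg hw]; exact ih acc

theorem pvRedA_eq_redB (a : PySem.Dict Int Bool) (cl acc : List Int) :
    pvRedA a acc cl = pvRedB a acc cl := by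
  induction cl generalizing acc with
  | nil => rfl
  | cons l rest ih => simp only [pvRedA, pvRedB]; cases a.get? |l| <;> simp [ih]

theorem pvRedB_nil (a : PySem.Dict Int Bool) (cl : List Int) :
    pvRedB a [] cl = pvRedL a cl := by
  rw [pvRedB_eq_redL]; cases pvRedL a cl <;> simp

theorem pvScanA_eq (a : PySem.Dict Int Bool) (cls : List (List Int)) (units : List Int) (newcls : List (List Int)) :
    pvScanA a cls units newcls = (pvSurv a cls).map (fun rs => (units ++ pvUnitsOf rs, newcls ++ rs)) := by
  induction cls generalizing units newcls with
  | nil => simp [pvScanA, pvSurv, pvUnitsOf]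
  | cons cl rest ih =>
      simp only [pvScanA, pvSurv, pvRedA_eq_redB, pvRedB_eq_redL]
      cases hr : pvRedL a cl with
      | none => simpa using ih units newcls
      | some r =>
          by_cases hre : r = []
          · simp [hre]
          · simp only [Option.map_some, List.nil_append, if_neg hre]
            rw [ih]
            cases pvSurv a rest with
            | none => simp
            | some rs =>
                simp only [Option.map_some, Option.some.injEq]
                by_cases h1 : r.length = 1
                · simp [pvUnitsOf, h1]
                · simp [pvUnitsOf, h1]

-- `a'` extends `a`
def pvSub (a a' : PySem.Dict Int Bool) : Prop :=
  ∀ k v, a.get? k = some v → a'.get? k = some v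

theorem pvApplyA_sub (a a' : PySem.Dict Int Bool) (us : List Int) (h : pvApplyA a us = some a') :
    pvSub a a' := by
  induction us generalizing a with
  | nil => simp only [pvApplyA, Option.some.injEq] at h; subst h; exact fun k v hv => hv
  | cons u rest ih =>
      simp only [pvApplyA] at h
      cases hg : a.get? |u| with
      | some w =>
          rw [hg] at h; simp only [] at h
          by_cases hw : w ≠ decide (0 < u)
          · simp [hw] at h
          · rw [if_neg (by simpa using hw)] at h
            exact ih _ h
      | none =>
          rw [hg] at h; simp only [] at h
          intro k v hv
          have hk : k ≠ |u| := fun he => by rw [he, hg] at hv; cases hv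
          exact ih _ h k v (by rw [PySem.Dict.get?_insert_of_ne _ _ hk]; exact hv)

theorem pvRedL_none_mono (a a' : PySem.Dict Int Bool) (hsub : pvSub a a') (cl : List Int)
    (h : pvRedL a cl = none) : pvRedL a' cl = none := by
  induction cl with
  | nil => simp [pvRedL] at h
  | cons l rest ih =>
      simp only [pvRedL] at h ⊢
      cases hg : a.get? |l| with
      | none =>
          rw [hg] at h; simp only [] at h
          have hrest : pvRedL a rest = none := by
            cases hr : pvRedL a rest with
            | none => rfl
            | some r => rw [hr] at h; simp at h
          cases hg' : a'.get? |l| with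
          | none => simp [ih hrest]
          | some w' =>
              by_cases hw' : w' = decide (0 < l)
              · simp [hw']
              · simp [hw', ih hrest]
      | some w =>
          rw [hg] at h; simp only [] at h
          by_cases hw : w = decide (0 < l)
          · rw [hsub _ _ hg]; simp [hw]
          · rw [if_neg hw] at h
            cases hg' : a'.get? |l| with
            | none => simp [ih h]
            | some w' =>
                by_cases hw' : w' = decide (0 < l)
                · simp [hw']
                · simp [hw', ih h]

theorem pvRedL_comp (a a' : PySem.Dict Int Bool) (hsub : pvSub a a') (cl r : List Int)
    (h : pvRedL a cl = some r) : pvRedL a' r = pvRedL a' cl := by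
  induction cl generalizing r with
  | nil => simp only [pvRedL, Option.some.injEq] at h; subst h; rfl
  | cons l rest ih =>
      simp only [pvRedL] at h
      cases hg : a.get? |l| with
      | none =>
          rw [hg] at h; simp only [] at h
          cases hr : pvRedL a rest with
          | none => rw [hr] at h; simp at h
          | some r0 =>
              rw [hr] at h; simp only [Option.map_some, Option.some.injEq] at h
              subst h
              simp only [pvRedL]
              cases a'.get? |l| with
              | none => rw [ih r0 hr]
              | some w' =>
                  by_cases hw' : w' = decide (0 < l)
                  · simp [hw']
                  · simp [hw', ih r0 hr]
      | some w =>
          rw [hg] at h; simp only [] at h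
          by_cases hw : w = decide (0 < l)
          · simp [hw] at h
          · rw [if_neg hw] at h
            rw [ih r h]
            simp only [pvRedL]
            rw [hsub _ _ hg]; simp [hw]

theorem pvSurv_comp (a a' : PySem.Dict Int Bool) (hsub : pvSub a a') (cls rs : List (List Int))
    (h : pvSurv a cls = some rs) : pvSurv a' rs = pvSurv a' cls := by
  induction cls generalizing rs with
  | nil => simp only [pvSurv, Option.some.injEq] at h; subst h; rfl
  | cons cl rest ih =>
      simp only [pvSurv] at h ⊢
      cases hr : pvRedL a cl with
      | none =>
          rw [hr] at h
          rw [pvRedL_none_mono a a' hsub cl hr]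
          exact ih rs h
      | some r =>
          rw [hr] at h; simp only [] at h
          by_cases hre : r = []
          · simp [hre] at h
          · rw [if_neg hre] at h
            cases hrest : pvSurv a rest with
            | none => rw [hrest] at h; simp at h
            | some rs0 =>
                rw [hrest] at h; simp only [Option.map_some, Option.some.injEq] at h
                subst h
                simp only [pvSurv]
                rw [pvRedL_comp a a' hsub cl r hr, ih rs0 hrest]

theorem pvFilter_of_surv (a : PySem.Dict Int Bool) (cls rs : List (List Int))
    (h : pvSurv a cls = some rs) : cls.filterMap (fun cl => pvRedB a [] cl) = rs := by
  induction cls generalizing rs with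
  | nil => simp only [pvSurv, Option.some.injEq] at h; subst h; rfl
  | cons cl rest ih =>
      simp only [pvSurv] at h
      simp only [List.filterMap_cons, pvRedB_nil]
      cases hr : pvRedL a cl with
      | none => simp only [hr] at h ⊢; simpa [pvRedB_nil] using ih rs h
      | some r =>
          simp only [hr] at h ⊢
          by_cases hre : r = []
          · simp [hre] at h
          · rw [if_neg hre] at h
            cases hrest : pvSurv a rest with
            | none => rw [hrest] at h; simp at h
            | some rs0 =>
                rw [hrest] at h; simp only [Option.map_some, Option.some.injEq] at h
                subst h
                simpa [pvRedB_nil] using ih rs0 hrest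

-- A's loop simulated by the round loop over the original clauses plus a final filter
theorem pvSim (orig : List (List Int)) (fuel : Nat) (cls : List (List Int)) (a : PySem.Dict Int Bool)
    (hinv : pvSurv a cls = pvSurv a orig) :
    pvLoopA fuel cls a =
      match pvRLoop orig fuel a with
      | none => none
      | some a' => some (orig.filterMap (fun cl => pvRedB a' [] cl)) := by
  induction fuel generalizing cls a with
  | zero => rfl
  | succ fuel ih =>
      simp only [pvLoopA, pvRLoop]
      rw [pvScanA_eq, hinv]
      cases hs : pvSurv a orig with
      | none => rfl
      | some rs =>
          simp only [Option.map_some, List.nil_append]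
          by_cases hu : pvUnitsOf rs = []
          · rw [if_pos hu, if_pos hu]
            show some rs = some (orig.filterMap (fun cl => pvRedB a [] cl))
            rw [pvFilter_of_surv a orig rs hs]
          · rw [if_neg hu, if_neg hu]
            cases ha : pvApplyA a (pvUnitsOf rs) with
            | none => rfl
            | some a' =>
                have hsub := pvApplyA_sub a a' _ ha
                have h1 : pvSurv a' rs = pvSurv a' orig := pvSurv_comp a a' hsub orig rs hs
                exact ih rs a' h1

-- ---------- characterization of pvRedL ----------

theorem pvRedL_some_iff (a : PySem.Dict Int Bool) (cl : List Int) (r : List Int) :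
    pvRedL a cl = some r ↔ ((∀ l ∈ cl, ¬ pvTrue a l) ∧ r = cl.filter (fun l => !(a.contains |l|))) := by
  induction cl generalizing r with
  | nil => simp [pvRedL, eq_comm]
  | cons l rest ih =>
      simp only [pvRedL, List.filter_cons, List.mem_cons]
      cases hg : a.get? |l| with
      | none =>
          have hc : a.contains |l| = false := by
            rw [PySem.Dict.contains_eq_isSome_get?, hg]; rfl
          simp only [hc, Bool.not_false, if_pos, Option.map_eq_some_iff]

          constructor
          · rintro ⟨r0, hr0, rfl⟩
            obtain ⟨h1, h2⟩ := (ih r0).mp hr0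
            refine ⟨?_, by rw [h2]⟩
            rintro x (rfl | hx)
            · simp [pvTrue, hg]
            · exact h1 x hx
          · rintro ⟨h1, rfl⟩
            exact ⟨_, (ih _).mpr ⟨fun x hx => h1 x (Or.inr hx), rfl⟩, rfl⟩
      | some w =>
          by_cases hw : w = decide (0 < l)
          · subst hw
            simp only [if_pos rfl]
            constructor
            · intro h; cases h
            · rintro ⟨h1, -⟩
              exact absurd (show pvTrue a l from hg) (h1 l (Or.inl rfl))
          · have hc : a.contains |l| = true := by
              rw [PySem.Dict.contains_eq_isSome_get?, hg]; rfl
            simp only [if_neg hw, hc, Bool.not_true, Bool.false_eq_true, if_false]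
            rw [ih]
            constructor
            · rintro ⟨h1, h2⟩
              refine ⟨?_, h2⟩
              rintro x (rfl | hx)
              · intro ht
                rw [show pvTrue a x ↔ a.get? |x| = some (decide (0 < x)) from Iff.rfl, hg] at ht
                exact hw (by injection ht)
              · exact h1 x hx
            · rintro ⟨h1, h2⟩
              exact ⟨fun x hx => h1 x (Or.inr hx), h2⟩

theorem pvRedL_none_iff (a : PySem.Dict Int Bool) (cl : List Int) :
    pvRedL a cl = none ↔ ∃ l ∈ cl, pvTrue a l := by
  constructor
  · intro h
    by_contra hne
    push Not at hne
    have := (pvRedL_some_iff a cl _).mpr ⟨hne, rfl⟩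
    rw [h] at this; cases this
  · rintro ⟨l, hl, ht⟩
    cases hr : pvRedL a cl with
    | none => rfl
    | some r =>
        obtain ⟨h1, -⟩ := (pvRedL_some_iff a cl r).mp hr
        exact absurd ht (h1 l hl)

-- ---------- generic list facts specific to these programs ----------

theorem pvFilter_singleton {p : Int → Bool} {cl : List Int} {u : Int}
    (h : cl.filter p = [u]) :
    u ∈ cl ∧ p u = true ∧ cl.count u = 1 ∧ ∀ l ∈ cl, l ≠ u → p l = false := by
  have hu : u ∈ cl ∧ p u = true := by
    have : u ∈ cl.filter p := by rw [h]; exact List.mem_singleton.mpr rfl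
    exact ⟨List.mem_of_mem_filter this, List.of_mem_filter this⟩
  refine ⟨hu.1, hu.2, ?_, ?_⟩
  · have h1 : cl.count u = (cl.filter p).count u := by
      rw [List.count_filter]
      · simp [hu.2]
    rw [h1, h]; simp
  · intro l hl hne
    by_contra hp
    have : l ∈ cl.filter p := List.mem_filter.mpr ⟨hl, by simpa using hp⟩
    rw [h] at this
    exact hne (List.mem_singleton.mp this)

theorem pvCountP_one_unique {p : Int → Bool} {cl : List Int} (h : cl.countP p = 1) :
    ∀ l ∈ cl, p l = true → ∀ l' ∈ cl, p l' = true → l = l' := by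
  intro l hl hpl l' hl' hpl'
  have hlen : (cl.filter p).length = 1 := by
    rw [← List.countP_eq_length_filter]; exact h
  obtain ⟨x, hx⟩ := List.length_eq_one_iff.mp hlen
  have h1 : l = x := List.mem_singleton.mp (hx ▸ List.mem_filter.mpr ⟨hl, hpl⟩)
  have h2 : l' = x := List.mem_singleton.mp (hx ▸ List.mem_filter.mpr ⟨hl', hpl'⟩)
  rw [h1, h2]

theorem pvSum_toNat_set (l : List Int) (i : Nat) (v : Int) (h : i < l.length) :
    ((l.set i v).map Int.toNat).sum + (l.getD i 0).toNat = (l.map Int.toNat).sum + v.toNat := by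
  induction l generalizing i with
  | nil => simp at h
  | cons x rest ih =>
      cases i with
      | zero => simp [List.set, List.getD]; omega
      | succ j =>
          simp only [List.set, List.map_cons, List.sum_cons, List.getD_cons_succ]
          have := ih j (by simpa using h)
          omega

-- ---------- consequences of soundness/completeness ----------

theorem pvClosed_complete (cls : List (List Int)) (a : PySem.Dict Int Bool)
    (hc : pvClosed cls a) : pvComplete cls a := by
  intro v b h
  induction h with
  | intro cl u hcl hu hcount hprem ih =>
      cases hg : a.get? |u| with
      | some b0 =>
          by_cases hb : b0 = decide (0 < u)
          · rw [hb]
          · exfalso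
            have hb' : b0 = !decide (0 < u) := by
              cases b0 <;> cases hdu : decide (0 < u) <;> simp [hdu] at hb ⊢
            have hfall : ∀ l ∈ cl, pvFals a l := by
              intro l hl
              by_cases hlu : l = u
              · subst hlu; rw [show pvFals a l ↔ a.get? |l| = some (!decide (0 < l)) from Iff.rfl, hg, hb']
              · exact ih l hl hlu
            rcases hc cl hcl with ⟨l, hl, ht⟩ | hcnt
            · have := hfall l hl
              rw [show pvTrue a l ↔ a.get? |l| = some (decide (0 < l)) from Iff.rfl] at ht
              rw [this] at ht
              have : (!decide (0 < l)) = decide (0 < l) := by injection ht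
              simp at this
            · have h0 : pvCnt a cl = 0 := by
                rw [show pvCnt a cl = cl.countP (fun l => !(a.contains |l|)) from rfl]
                rw [List.countP_eq_zero]
                intro l hl
                have := hfall l hl
                have hco : a.contains |l| = true := by
                  rw [PySem.Dict.contains_eq_isSome_get?, this]; rfl
                simp [hco]
              omega
      | none =>
          exfalso
          have hfall : ∀ l ∈ cl, l ≠ u → pvFals a l := ih
          rcases hc cl hcl with ⟨l, hl, ht⟩ | hcnt
          · by_cases hlu : l = u
            · subst hlu
              rw [show pvTrue a l ↔ a.get? |l| = some (decide (0 < l)) from Iff.rfl, hg] at ht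
              cases ht
            · have := hfall l hl hlu
              rw [show pvTrue a l ↔ a.get? |l| = some (decide (0 < l)) from Iff.rfl, this] at ht
              simp at ht
          · have h1 : pvCnt a cl = cl.count u := by
              rw [show pvCnt a cl = cl.countP (fun l => !(a.contains |l|)) from rfl,
                  show cl.count u = cl.countP (fun l => l == u) from rfl]
              apply List.countP_congr
              intro l hl
              by_cases hlu : l = u
              · subst hlu
                have hco : a.contains |l| = false := by
                  rw [PySem.Dict.contains_eq_isSome_get?, hg]; rfl
                simp [hco]
              · have := hfall l hl hlu
                have hco : a.contains |l| = true := by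
                  rw [PySem.Dict.contains_eq_isSome_get?, this]; rfl
                simp [hco, hlu]
            rw [h1, hcount] at hcnt
            omega

theorem pvOk_of (cls : List (List Int)) (a : PySem.Dict Int Bool)
    (hcomp : pvComplete cls a) (hcl : pvClosed cls a) : pvOk cls := by
  constructor
  · intro v b b' h h'
    have := hcomp v b h
    have := hcomp v b' h'
    simp_all
  · intro cl hc hall
    have hfall : ∀ l ∈ cl, pvFals a l := fun l hl => hcomp _ _ (hall l hl)
    rcases hcl cl hc with ⟨l, hl, ht⟩ | hcnt
    · have := hfall l hl
      rw [show pvTrue a l ↔ a.get? |l| = some (decide (0 < l)) from Iff.rfl, this] at ht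
      simp at ht
    · have h0 : pvCnt a cl = 0 := by
        rw [show pvCnt a cl = cl.countP (fun l => !(a.contains |l|)) from rfl]
        rw [List.countP_eq_zero]
        intro l hl
        have := hfall l hl
        have hco : a.contains |l| = true := by
          rw [PySem.Dict.contains_eq_isSome_get?, this]; rfl
        simp [hco]
      omega

theorem pvAgree (cls : List (List Int)) (a a' : PySem.Dict Int Bool)
    (h1s : pvSound cls a) (h1c : pvComplete cls a)
    (h2s : pvSound cls a') (h2c : pvComplete cls a') : ∀ v, a.get? v = a'.get? v := by
  intro v
  cases hg : a.get? v with
  | some b => exact (h2c v b (h1s v b hg)).symm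
  | none =>
      cases hg' : a'.get? v with
      | none => rfl
      | some b =>
          have := h1c v b (h2s v b hg')
          rw [hg] at this; cases this

theorem pvRedL_congr (a a' : PySem.Dict Int Bool) (hag : ∀ v, a.get? v = a'.get? v)
    (cl : List Int) : pvRedL a cl = pvRedL a' cl := by
  induction cl with
  | nil => rfl
  | cons l rest ih =>
      simp only [pvRedL, hag |l|]
      cases a'.get? |l| <;> simp [ih]

-- ---------- round-loop characterization ----------

-- a false literal = assigned but not satisfying
theorem pvFals_of (a : PySem.Dict Int Bool) (l : Int) (hc : a.contains |l| = true)
    (hnt : ¬ pvTrue a l) : pvFals a l := by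
  rw [PySem.Dict.contains_eq_isSome_get?] at hc
  cases hg : a.get? |l| with
  | none => rw [hg] at hc; cases hc
  | some b =>
      rw [show pvFals a l ↔ a.get? |l| = some (!decide (0 < l)) from Iff.rfl, hg]
      rw [show pvTrue a l ↔ a.get? |l| = some (decide (0 < l)) from Iff.rfl, hg] at hnt
      cases b <;> cases hd : decide (0 < l) <;> simp_all

theorem pvNone_of (a : PySem.Dict Int Bool) (v : Int) (hc : a.contains v = false) :
    a.get? v = none := by
  rw [PySem.Dict.contains_eq_isSome_get?] at hc
  cases hg : a.get? v with
  | none => rfl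
  | some b => rw [hg] at hc; cases hc

theorem pvSurv_mem_inv (a : PySem.Dict Int Bool) (cls rs : List (List Int))
    (h : pvSurv a cls = some rs) : ∀ r ∈ rs, ∃ cl ∈ cls, pvRedL a cl = some r := by
  induction cls generalizing rs with
  | nil => simp only [pvSurv, Option.some.injEq] at h; subst h; intro r hr; cases hr
  | cons cl rest ih =>
      simp only [pvSurv] at h
      cases hr0 : pvRedL a cl with
      | none =>
          rw [hr0] at h
          simp only [] at h
          intro r hr
          obtain ⟨cl', hcl', hred⟩ := ih rs h r hr
          exact ⟨cl', List.mem_cons_of_mem _ hcl', hred⟩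
      | some r0 =>
          rw [hr0] at h
          simp only [] at h
          by_cases hre : r0 = []
          · simp [hre] at h
          · rw [if_neg hre] at h
            cases hrest : pvSurv a rest with
            | none => rw [hrest] at h; cases h
            | some rs0 =>
                rw [hrest] at h
                simp only [Option.map_some, Option.some.injEq] at h
                subst h
                intro r hrm
                rcases List.mem_cons.mp hrm with rfl | hr
                · exact ⟨cl, List.mem_cons_self, hr0⟩
                · obtain ⟨cl', hcl', hred⟩ := ih rs0 hrest r hr
                  exact ⟨cl', List.mem_cons_of_mem _ hcl', hred⟩

theorem pvSurv_mem_fwd (a : PySem.Dict Int Bool) (cls rs : List (List Int)) (cl r : List Int)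
    (h : pvSurv a cls = some rs) (hcl : cl ∈ cls) (hr : pvRedL a cl = some r) :
    r ≠ [] ∧ r ∈ rs := by
  induction cls generalizing rs with
  | nil => cases hcl
  | cons cl0 rest ih =>
      simp only [pvSurv] at h
      cases hr0 : pvRedL a cl0 with
      | none =>
          rw [hr0] at h
          simp only [] at h
          rcases List.mem_cons.mp hcl with rfl | hcl'
          · rw [hr0] at hr; cases hr
          · exact ih rs h hcl'
      | some r0 =>
          rw [hr0] at h
          simp only [] at h
          by_cases hre : r0 = []
          · simp [hre] at h
          · rw [if_neg hre] at h
            cases hrest : pvSurv a rest with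
            | none => rw [hrest] at h; cases h
            | some rs0 =>
                rw [hrest] at h
                simp only [Option.map_some, Option.some.injEq] at h
                subst h
                rcases List.mem_cons.mp hcl with rfl | hcl'
                · rw [hr0] at hr
                  injection hr with hr
                  subst hr
                  exact ⟨hre, List.mem_cons_self⟩
                · obtain ⟨h1, h2⟩ := ih rs0 hrest hcl'
                  exact ⟨h1, List.mem_cons_of_mem _ h2⟩

theorem pvSurv_none_ex (a : PySem.Dict Int Bool) (cls : List (List Int))
    (h : pvSurv a cls = none) : ∃ cl ∈ cls, ∀ l ∈ cl, pvFals a l := by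
  induction cls with
  | nil => cases h
  | cons cl rest ih =>
      simp only [pvSurv] at h
      cases hr0 : pvRedL a cl with
      | none =>
          rw [hr0] at h
          simp only [] at h
          obtain ⟨cl', h1, h2⟩ := ih h
          exact ⟨cl', List.mem_cons_of_mem _ h1, h2⟩
      | some r0 =>
          rw [hr0] at h
          simp only [] at h
          by_cases hre : r0 = []
          · subst hre
            obtain ⟨hnt, hfil⟩ := (pvRedL_some_iff a cl []).mp hr0
            refine ⟨cl, List.mem_cons_self, ?_⟩
            intro l hl
            have hc : a.contains |l| = true := by
              have := List.filter_eq_nil_iff.mp hfil.symm l hl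
              simpa using this
            exact pvFals_of a l hc (hnt l hl)
          · rw [if_neg hre] at h
            cases hrest : pvSurv a rest with
            | none =>
                obtain ⟨cl', h1, h2⟩ := ih hrest
                exact ⟨cl', List.mem_cons_of_mem _ h1, h2⟩
            | some rs0 => rw [hrest] at h; cases h

theorem pvSurv_nil_mem (a : PySem.Dict Int Bool) (cls : List (List Int))
    (h : [] ∈ cls) : pvSurv a cls = none := by
  induction cls with
  | nil => cases h
  | cons cl rest ih =>
      simp only [pvSurv]
      rcases List.mem_cons.mp h with rfl | h'
      · simp [pvRedL]
      · cases hr0 : pvRedL a cl with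
        | none => exact ih h'
        | some r0 =>
            simp only []
            by_cases hre : r0 = []
            · simp [hre]
            · rw [if_neg hre, ih h']; rfl

theorem pvUnits_forced (a : PySem.Dict Int Bool) (cls rs : List (List Int))
    (h : pvSurv a cls = some rs) (hs : pvSound cls a) :
    ∀ u ∈ pvUnitsOf rs, pvForced cls |u| (decide (0 < u)) ∧ a.get? |u| = none ∧ ∃ cl ∈ cls, u ∈ cl := by
  intro u hu
  obtain ⟨r, hr, hf⟩ := List.mem_filterMap.mp hu
  by_cases h1 : r.length = 1
  swap
  · simp [h1] at hf
  rw [if_pos h1] at hf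
  injection hf with hf
  obtain ⟨x, hx⟩ := List.length_eq_one_iff.mp h1
  subst hx
  simp only [List.headI] at hf
  subst hf
  obtain ⟨cl, hcl, hred⟩ := pvSurv_mem_inv a cls rs h _ hr
  obtain ⟨hnt, hfil⟩ := (pvRedL_some_iff a cl _).mp hred
  obtain ⟨humem, hpu, hcount, hother⟩ := pvFilter_singleton hfil.symm
  have hgu : a.get? |x| = none := pvNone_of a |x| (by simpa using hpu)
  refine ⟨?_, hgu, cl, hcl, humem⟩
  exact pvForced.intro cl x hcl humem hcount (fun l hl hlu => by
    have hc : a.contains |l| = true := by simpa using hother l hl hlu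
    exact hs _ _ (pvFals_of a l hc (hnt l hl)))

theorem pvClosed_of_scan (a : PySem.Dict Int Bool) (cls rs : List (List Int))
    (h : pvSurv a cls = some rs) (hu : pvUnitsOf rs = []) : pvClosed cls a := by
  intro cl hcl
  cases hr : pvRedL a cl with
  | none => exact Or.inl ((pvRedL_none_iff a cl).mp hr)
  | some r =>
      obtain ⟨hne, hmem⟩ := pvSurv_mem_fwd a cls rs cl r h hcl hr
      obtain ⟨hnt, hfil⟩ := (pvRedL_some_iff a cl r).mp hr
      have hcnt : pvCnt a cl = r.length := by
        rw [show pvCnt a cl = cl.countP (fun l => !(a.contains |l|)) from rfl,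
            List.countP_eq_length_filter, ← hfil]
      right
      rw [hcnt]
      rcases Nat.lt_or_ge r.length 2 with hlt | hge
      · exfalso
        have h1 : r.length = 1 := by
          have : r.length ≠ 0 := fun h0 => hne (List.length_eq_zero_iff.mp h0)
          omega
        have : r.headI ∈ pvUnitsOf rs :=
          List.mem_filterMap.mpr ⟨r, hmem, by rw [if_pos h1]⟩
        rw [hu] at this; cases this
      · exact hge

theorem pvApplyA_sound (cls : List (List Int)) (a a' : PySem.Dict Int Bool) (us : List Int)
    (h : pvApplyA a us = some a') (hs : pvSound cls a)
    (hu : ∀ u ∈ us, pvForced cls |u| (decide (0 < u))) : pvSound cls a' := by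
  induction us generalizing a with
  | nil => simp only [pvApplyA, Option.some.injEq] at h; subst h; exact hs
  | cons u rest ih =>
      simp only [pvApplyA] at h
      cases hg : a.get? |u| with
      | some w =>
          rw [hg] at h; simp only [] at h
          by_cases hw : w ≠ decide (0 < u)
          · simp [hw] at h
          · rw [if_neg (by simpa using hw)] at h
            exact ih a h hs (fun x hx => hu x (List.mem_cons_of_mem _ hx))
      | none =>
          rw [hg] at h; simp only [] at h
          refine ih _ h ?_ (fun x hx => hu x (List.mem_cons_of_mem _ hx))
          intro v b hv
          rw [PySem.Dict.get?_insert] at hv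
          by_cases hvu : v = |u|
          · rw [if_pos hvu] at hv
            injection hv with hv
            rw [hvu, ← hv]
            exact hu u List.mem_cons_self
          · rw [if_neg hvu] at hv
            exact hs v b hv

theorem pvApplyA_keys (a a' : PySem.Dict Int Bool) (us : List Int)
    (h : pvApplyA a us = some a') : ∀ k ∈ a'.keys, k ∈ a.keys ∨ ∃ u ∈ us, k = |u| := by
  induction us generalizing a with
  | nil => simp only [pvApplyA, Option.some.injEq] at h; subst h; exact fun k hk => Or.inl hk
  | cons u rest ih =>
      simp only [pvApplyA] at h
      cases hg : a.get? |u| with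
      | some w =>
          rw [hg] at h; simp only [] at h
          by_cases hw : w ≠ decide (0 < u)
          · simp [hw] at h
          · rw [if_neg (by simpa using hw)] at h
            intro k hk
            rcases ih a h k hk with h1 | ⟨x, hx1, hx2⟩
            · exact Or.inl h1
            · exact Or.inr ⟨x, List.mem_cons_of_mem _ hx1, hx2⟩
      | none =>
          rw [hg] at h; simp only [] at h
          intro k hk
          rcases ih _ h k hk with h1 | ⟨x, hx1, hx2⟩
          · rcases (PySem.Dict.mem_keys_insert _ _ _ _).mp h1 with h2 | h2
            · exact Or.inr ⟨u, List.mem_cons_self, h2⟩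
            · exact Or.inl h2
          · exact Or.inr ⟨x, List.mem_cons_of_mem _ hx1, hx2⟩

theorem pvApplyA_nodup (a a' : PySem.Dict Int Bool) (us : List Int)
    (h : pvApplyA a us = some a') (hn : a.keys.Nodup) : a'.keys.Nodup := by
  induction us generalizing a with
  | nil => simp only [pvApplyA, Option.some.injEq] at h; subst h; exact hn
  | cons u rest ih =>
      simp only [pvApplyA] at h
      cases hg : a.get? |u| with
      | some w =>
          rw [hg] at h; simp only [] at h
          by_cases hw : w ≠ decide (0 < u)
          · simp [hw] at h
          · rw [if_neg (by simpa using hw)] at h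
            exact ih a h hn
      | none =>
          rw [hg] at h; simp only [] at h
          exact ih _ h (PySem.Dict.nodup_keys_insert _ _ _ hn)

theorem pvApplyA_size_le (us : List Int) (a a' : PySem.Dict Int Bool)
    (h : pvApplyA a us = some a') : a.size ≤ a'.size := by
  induction us generalizing a with
  | nil => simp only [pvApplyA, Option.some.injEq] at h; subst h; exact le_rfl
  | cons u rest ih =>
      simp only [pvApplyA] at h
      cases hg : a.get? |u| with
      | some w =>
          rw [hg] at h; simp only [] at h
          by_cases hw : w ≠ decide (0 < u)
          · simp [hw] at h
          · rw [if_neg (by simpa using hw)] at h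
            exact ih a h
      | none =>
          rw [hg] at h; simp only [] at h
          refine le_trans ?_ (ih _ h)
          rw [PySem.Dict.size_insert]
          have hc : a.contains |u| = false := by
            rw [PySem.Dict.contains_eq_isSome_get?, hg]; rfl
          rw [hc]
          simp

theorem pvApplyA_size_lt (a a' : PySem.Dict Int Bool) (us : List Int)
    (h : pvApplyA a us = some a') (hex : ∃ u ∈ us, a.get? |u| = none) : a.size < a'.size := by
  induction us generalizing a with
  | nil => obtain ⟨x, hx, -⟩ := hex; cases hx
  | cons u rest ih =>
      simp only [pvApplyA] at h
      cases hg : a.get? |u| with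
      | some w =>
          rw [hg] at h; simp only [] at h
          by_cases hw : w ≠ decide (0 < u)
          · simp [hw] at h
          · rw [if_neg (by simpa using hw)] at h
            obtain ⟨x, hx, hgx⟩ := hex
            rcases List.mem_cons.mp hx with rfl | hx'
            · rw [hg] at hgx; cases hgx
            · exact ih a h ⟨x, hx', hgx⟩
      | none =>
          rw [hg] at h; simp only [] at h
          have h1 : a.size < (a.insert |u| (decide (0 < u))).size := by
            rw [PySem.Dict.size_insert]
            have hc : a.contains |u| = false := by
              rw [PySem.Dict.contains_eq_isSome_get?, hg]; rfl
            rw [hc]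
            simp
          exact lt_of_lt_of_le h1 (pvApplyA_size_le rest _ a' h)

theorem pvApplyA_total (cls : List (List Int)) (a : PySem.Dict Int Bool) (us : List Int)
    (hs : pvSound cls a) (hu : ∀ u ∈ us, pvForced cls |u| (decide (0 < u)))
    (hok : ∀ v b b', pvForced cls v b → pvForced cls v b' → b = b') :
    ∃ a', pvApplyA a us = some a' := by
  induction us generalizing a with
  | nil => exact ⟨a, rfl⟩
  | cons u rest ih =>
      simp only [pvApplyA]
      cases hg : a.get? |u| with
      | some w =>
          have hw : w = decide (0 < u) :=
            hok |u| w (decide (0 < u)) (hs _ _ hg) (hu u List.mem_cons_self)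
          simp only [hw, ne_eq, not_true_eq_false, if_neg, not_not]
          rw [if_neg (by simp)]
          exact ih a hs (fun x hx => hu x (List.mem_cons_of_mem _ hx))
      | none =>
          refine ih _ ?_ (fun x hx => hu x (List.mem_cons_of_mem _ hx))
          intro v b hv
          rw [PySem.Dict.get?_insert] at hv
          by_cases hvu : v = |u|
          · rw [if_pos hvu] at hv
            injection hv with hv
            rw [hvu, ← hv]
            exact hu u List.mem_cons_self
          · rw [if_neg hvu] at hv
            exact hs v b hv

theorem pvSize_keys (d : PySem.Dict Int Bool) : d.size = d.keys.length := by
  simp [PySem.Dict.size, PySem.Dict.keys]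

theorem pvRLoop_some (cls : List (List Int)) (fuel : Nat) (a0 a : PySem.Dict Int Bool)
    (h : pvRLoop cls fuel a0 = some a) (hs : pvSound cls a0) :
    pvSound cls a ∧ pvClosed cls a := by
  induction fuel generalizing a0 with
  | zero => cases h
  | succ fuel ih =>
      simp only [pvRLoop] at h
      cases hs1 : pvSurv a0 cls with
      | none => rw [hs1] at h; cases h
      | some rs =>
          rw [hs1] at h; simp only [] at h
          by_cases hu : pvUnitsOf rs = []
          · rw [if_pos hu] at h
            injection h with h
            subst h
            exact ⟨hs, pvClosed_of_scan a0 cls rs hs1 hu⟩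
          · rw [if_neg hu] at h
            cases ha : pvApplyA a0 (pvUnitsOf rs) with
            | none => rw [ha] at h; cases h
            | some a1 =>
                rw [ha] at h; simp only [] at h
                have hforced := pvUnits_forced a0 cls rs hs1 hs
                exact ih a1 h
                  (pvApplyA_sound cls a0 a1 _ ha hs (fun x hx => (hforced x hx).1))

theorem pvRLoop_total (cls : List (List Int)) (hok : pvOk cls) :
    ∀ (fuel : Nat) (a0 : PySem.Dict Int Bool), pvSound cls a0 → a0.keys.Nodup →
    (∀ k ∈ a0.keys, k ∈ cls.flatten.map (fun l : Int => |l|)) →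
    (cls.flatten.map (fun l : Int => |l|)).length - a0.size < fuel →
    ∃ a, pvRLoop cls fuel a0 = some a := by
  intro fuel
  induction fuel with
  | zero => intro a0 _ _ _ hb; exact absurd hb (Nat.not_lt_zero _)
  | succ fuel ih =>
      intro a0 hs hn hk hb
      cases hs1 : pvSurv a0 cls with
      | none =>
          exfalso
          obtain ⟨cl, hcl, hfall⟩ := pvSurv_none_ex a0 cls hs1
          exact hok.2 cl hcl (fun l hl => hs _ _ (hfall l hl))
      | some rs =>
          by_cases hu : pvUnitsOf rs = []
          · exact ⟨a0, by simp only [pvRLoop, hs1, hu, if_pos]⟩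
          · have hforced := pvUnits_forced a0 cls rs hs1 hs
            obtain ⟨a1, ha⟩ :=
              pvApplyA_total cls a0 _ hs (fun x hx => (hforced x hx).1) hok.1
            have hs' : pvSound cls a1 :=
              pvApplyA_sound cls a0 a1 _ ha hs (fun x hx => (hforced x hx).1)
            have hn' : a1.keys.Nodup := pvApplyA_nodup a0 a1 _ ha hn
            have hk' : ∀ k ∈ a1.keys, k ∈ cls.flatten.map (fun l : Int => |l|) := by
              intro k hkk
              rcases pvApplyA_keys a0 a1 _ ha k hkk with h1 | ⟨x, hx1, hx2⟩
              · exact hk k h1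
              · subst hx2
                obtain ⟨-, -, cl, hcl, hx⟩ := hforced x hx1
                exact List.mem_map.mpr ⟨x, List.mem_flatten.mpr ⟨cl, hcl, hx⟩, rfl⟩
            have hsz : a0.size < a1.size := by
              obtain ⟨u, humem⟩ := List.exists_mem_of_ne_nil _ hu
              exact pvApplyA_size_lt a0 a1 _ ha ⟨u, humem, (hforced u humem).2.1⟩
            have hle : a1.size ≤ (cls.flatten.map (fun l : Int => |l|)).length := by
              rw [pvSize_keys]
              exact (List.subperm_of_subset hn' (fun k hkk => hk' k hkk)).length_le
            obtain ⟨a2, ha2⟩ := ih a1 hs' hn' hk' (by omega)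
            refine ⟨a2, ?_⟩
            simp only [pvRLoop, hs1]
            rw [if_neg hu, ha]
            exact ha2

-- ---------- occurrence-index characterization ----------

def pvOccAt (l : Int) : List (List Int) → Nat → List Nat
  | [], _ => []
  | cl :: rest, i => List.replicate (cl.count l) i ++ pvOccAt l rest (i + 1)

def pvOccSpec (cls : List (List Int)) (occ : PySem.Dict Int (List Nat)) : Prop :=
  ∀ l : Int, (∀ i ∈ occ.getD l [], i < cls.length) ∧
    ∀ i, i < cls.length → (occ.getD l []).count i = (cls.getD i []).count l

theorem pvFoldl_occ_getD (cl : List Int) (o : PySem.Dict Int (List Nat)) (i : Nat) (l : Int) :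
    (cl.foldl (fun o l' => o.insert l' (o.getD l' [] ++ [i])) o).getD l [] =
      o.getD l [] ++ List.replicate (cl.count l) i := by
  induction cl generalizing o with
  | nil => simp
  | cons x rest ih =>
      simp only [List.foldl_cons, List.count_cons]
      rw [ih]
      rw [PySem.Dict.getD_insert]
      by_cases hlx : l = x
      · rw [if_pos hlx, hlx]
        simp [List.replicate_succ]
      · rw [if_neg hlx]
        have hbx : (x == l) = false := by simpa using fun he => hlx he.symm
        simp [hbx]

theorem pvOccAt_mem (l : Int) (rest : List (List Int)) (i : Nat) :
    ∀ j ∈ pvOccAt l rest i, i ≤ j ∧ j < i + rest.length := by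
  induction rest generalizing i with
  | nil => intro j hj; cases hj
  | cons cl rest ih =>
      intro j hj
      rcases List.mem_append.mp hj with hj | hj
      · have := List.eq_of_mem_replicate hj
        subst this
        simp
      · have := ih (i + 1) j hj
        constructor <;> [omega; (simp only [List.length_cons]; omega)]

theorem pvOccAt_count (l : Int) (rest : List (List Int)) (i j : Nat) (hj : j < rest.length) :
    (pvOccAt l rest i).count (i + j) = (rest.getD j []).count l := by
  induction rest generalizing i j with
  | nil => simp at hj
  | cons cl rest ih =>
      simp only [pvOccAt, List.count_append]
      cases j with
      | zero =>
          simp only [Nat.add_zero, List.getD_cons_zero, List.count_replicate]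
          have h0 : (pvOccAt l rest (i + 1)).count i = 0 := by
            rw [List.count_eq_zero]
            intro hm
            have := pvOccAt_mem l rest (i + 1) i hm
            omega
          simp [h0]
      | succ j' =>
          have h0 : (List.replicate (cl.count l) i).count (i + (j' + 1)) = 0 := by
            rw [List.count_eq_zero]
            intro hm
            have := List.eq_of_mem_replicate hm
            omega
          rw [h0]
          have := ih (i + 1) j' (by simpa using hj)
          simp only [List.getD_cons_succ]
          rw [← this]
          ring_nf

theorem pvBuild_none (rest : List (List Int)) :
    ∀ (i : Nat) occ cnts queue, pvBuild rest i occ cnts queue = none → [] ∈ rest := by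
  induction rest with
  | nil => intro i occ cnts queue h; cases h
  | cons cl rest ih =>
      intro i occ cnts queue h
      simp only [pvBuild] at h
      by_cases hlen : cl.length = 0
      · exact List.mem_cons.mpr (Or.inl (List.length_eq_zero_iff.mp hlen).symm)
      · rw [if_neg hlen] at h
        exact List.mem_cons_of_mem _ (ih _ _ _ _ h)

theorem pvBuild_spec (rest : List (List Int)) :
    ∀ (i : Nat) occ cnts queue occF cF qF, pvBuild rest i occ cnts queue = some (occF, cF, qF) →
    (∀ l : Int, occF.getD l [] = occ.getD l [] ++ pvOccAt l rest i) ∧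
    cF = cnts ++ rest.map (fun cl => (cl.length : Int)) ∧
    qF = queue ++ (rest.filter (fun cl => cl.length = 1)).map (fun cl => cl.headI) ∧
    (∀ cl ∈ rest, cl ≠ []) := by
  induction rest with
  | nil =>
      intro i occ cnts queue occF cF qF h
      simp only [pvBuild, Option.some.injEq, Prod.mk.injEq] at h
      obtain ⟨h1, h2, h3⟩ := h
      subst h1; subst h2; subst h3
      refine ⟨fun l => by simp [pvOccAt], by simp, by simp, fun cl hcl => absurd hcl (by simp)⟩
  | cons cl rest ih =>
      intro i occ cnts queue occF cF qF h
      simp only [pvBuild] at h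
      by_cases hlen : cl.length = 0
      · rw [if_pos hlen] at h; cases h
      · rw [if_neg hlen] at h
        obtain ⟨ho, hc, hq, hne⟩ := ih _ _ _ _ _ _ _ h
        refine ⟨?_, ?_, ?_, ?_⟩
        · intro l
          rw [ho l, pvFoldl_occ_getD]
          simp [pvOccAt]
        · rw [hc]; simp
        · rw [hq]
          by_cases h1 : cl.length = 1
          · rw [if_pos h1, List.filter_cons_of_pos (by simpa using h1)]
            simp
          · rw [if_neg h1, List.filter_cons_of_neg (by simpa using h1)]
        · intro cl' hcl'
          rcases List.mem_cons.mp hcl' with rfl | h2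
          · exact fun he => hlen (by rw [he]; rfl)
          · exact hne cl' h2

-- ---------- queue-loop invariant ----------

def pvQInv (cls : List (List Int)) (a : PySem.Dict Int Bool) (sat : List Bool)
    (cnt : List Int) (pending : List Int) : Prop :=
  sat.length = cls.length ∧ cnt.length = cls.length ∧
  pvSound cls a ∧
  (∀ i, i < cls.length → (sat.getD i false = true ↔ pvSatP a (cls.getD i []))) ∧
  (∀ i, i < cls.length → ¬ pvSatP a (cls.getD i []) →
      cnt.getD i 0 = (pvCnt a (cls.getD i []) : Int) ∧ 1 ≤ pvCnt a (cls.getD i [])) ∧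
  (∀ i, i < cls.length → 1 ≤ cnt.getD i 0) ∧
  (∀ u ∈ pending, pvForced cls |u| (decide (0 < u))) ∧
  (∀ i, i < cls.length → ¬ pvSatP a (cls.getD i []) → pvCnt a (cls.getD i []) = 1 →
      ∀ l ∈ cls.getD i [], a.contains |l| = false → l ∈ pending)

def pvM (cnt : List Int) (pending : List Int) : Nat :=
  pending.length + (cnt.map Int.toNat).sum

-- literal status under one new assignment
theorem pvTrue_insert (a : PySem.Dict Int Bool) (u l : Int) (hg : a.get? |u| = none) :
    pvTrue (a.insert |u| (decide (0 < u))) l ↔ (pvTrue a l ∨ l = u) := by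
  rw [show pvTrue (a.insert |u| (decide (0 < u))) l ↔
      (a.insert |u| (decide (0 < u))).get? |l| = some (decide (0 < l)) from Iff.rfl,
    PySem.Dict.get?_insert]
  by_cases habs : |l| = |u|
  · rw [if_pos habs]
    have hnt : ¬ pvTrue a l := by
      rw [show pvTrue a l ↔ a.get? |l| = some (decide (0 < l)) from Iff.rfl, habs, hg]
      simp
    constructor
    · intro h
      injection h with h
      right
      rcases abs_eq_abs.mp habs with h1 | h1
      · exact h1
      · subst h1
        have h2 : (0 < u) ↔ (0 < -u) := by simpa using h
        by_cases hp : (0 : Int) < u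
        · have := h2.mp hp; omega
        · have : ¬ (0 : Int) < -u := fun hq => hp (h2.mpr hq)
          omega
    · rintro (h | rfl)
      · exact absurd h hnt
      · rfl
  · rw [if_neg habs]
    constructor
    · intro h; exact Or.inl h
    · rintro (h | rfl)
      · exact h
      · exact absurd rfl habs

theorem pvSatP_insert (a : PySem.Dict Int Bool) (u : Int) (cl : List Int) (hg : a.get? |u| = none) :
    pvSatP (a.insert |u| (decide (0 < u))) cl ↔ (pvSatP a cl ∨ u ∈ cl) := by
  constructor
  · rintro ⟨l, hl, ht⟩
    rcases (pvTrue_insert a u l hg).mp ht with h | rfl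
    · exact Or.inl ⟨l, hl, h⟩
    · exact Or.inr hl
  · rintro (⟨l, hl, ht⟩ | hm)
    · exact ⟨l, hl, (pvTrue_insert a u l hg).mpr (Or.inl ht)⟩
    · exact ⟨u, hm, (pvTrue_insert a u u hg).mpr (Or.inr rfl)⟩

theorem pvCnt_insert (a : PySem.Dict Int Bool) (u : Int) (cl : List Int)
    (hg : a.get? |u| = none) (hun : u ∉ cl) :
    pvCnt a cl = pvCnt (a.insert |u| (decide (0 < u))) cl + cl.count (-u) := by
  induction cl with
  | nil => simp [pvCnt]
  | cons x rest ih =>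
      have hxu : x ≠ u := fun he => hun (he ▸ List.mem_cons_self)
      have hun' : u ∉ rest := fun hm => hun (List.mem_cons_of_mem _ hm)
      have ih' := ih hun'
      simp only [pvCnt, List.countP_cons, List.count_cons] at ih' ⊢
      by_cases habs : |x| = |u|
      · have hx : x = -u := by
          rcases abs_eq_abs.mp habs with h | h
          · exact absurd h hxu
          · exact h
        have hcA : a.contains |x| = false := by
          rw [habs, PySem.Dict.contains_eq_isSome_get?, hg]; rfl
        have hcA' : (a.insert |u| (decide (0 < u))).contains |x| = true := by
          rw [PySem.Dict.contains_insert]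
          simp [habs]
        have hbx : (x == -u) = true := by simpa using hx
        rw [hcA, hcA', hbx]
        simp only [Bool.not_false, Bool.not_true]
        simp only [if_pos rfl, Bool.false_eq_true, if_false]
        omega
      · have hceq : (a.insert |u| (decide (0 < u))).contains |x| = a.contains |x| := by
          rw [PySem.Dict.contains_insert]
          have : (|x| == |u|) = false := by simpa using habs
          rw [this, Bool.false_or]
        have hbx : (x == -u) = false := by
          simp only [beq_eq_false_iff_ne, ne_eq]
          intro he
          exact habs (by rw [he]; simp)
        rw [hceq, hbx]
        cases hca : a.contains |x| <;> simp <;> omega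

theorem pvFoldl_set_true_len (idxs : List Nat) (sat : List Bool) :
    (idxs.foldl (fun s i => s.set i true) sat).length = sat.length := by
  induction idxs generalizing sat with
  | nil => rfl
  | cons i is ih => simp only [List.foldl_cons]; rw [ih, List.length_set]

theorem pvFoldl_set_true_getD (idxs : List Nat) (sat : List Bool) (j : Nat)
    (hj : j < sat.length) :
    (idxs.foldl (fun s i => s.set i true) sat).getD j false = (sat.getD j false || decide (j ∈ idxs)) := by
  induction idxs generalizing sat with
  | nil => simp
  | cons i is ih =>
      simp only [List.foldl_cons]
      rw [ih _ (by rw [List.length_set]; exact hj)]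
      have hset : (sat.set i true).getD j false = (sat.getD j false || decide (j = i)) := by
        rw [List.getD_eq_getElem?_getD, List.getD_eq_getElem?_getD, List.getElem?_set]
        by_cases hij : i = j
        · subst hij
          rw [if_pos rfl, if_pos hj]
          simp
        · rw [if_neg hij]
          have : ¬ j = i := fun he => hij he.symm
          simp [this]
      rw [hset]
      by_cases hm : j = i
      · simp [hm]
      · simp [hm, List.mem_cons]

theorem pvGetD_set_self (l : List Int) (i : Nat) (v : Int) (h : i < l.length) :
    (l.set i v).getD i 0 = v := by
  rw [List.getD_eq_getElem?_getD, List.getElem?_set]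
  simp [h]

theorem pvGetD_set_ne (l : List Int) (i j : Nat) (v : Int) (h : j ≠ i) :
    (l.set i v).getD j 0 = l.getD j 0 := by
  rw [List.getD_eq_getElem?_getD, List.getElem?_set, if_neg (fun he => h he.symm),
    ← List.getD_eq_getElem?_getD]

-- ---------- the pvDec specification ----------

theorem pvDec_spec (cls : List (List Int)) (a' : PySem.Dict Int Bool) (sat' : List Bool)
    (rest : List Int) (hlen_s : sat'.length = cls.length)
    (hsat : ∀ i, i < cls.length → (sat'.getD i false = true ↔ pvSatP a' (cls.getD i [])))
    (hsound : pvSound cls a') :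
    ∀ (idxs : List Nat) (cnt : List Int) (app : List Int),
    cnt.length = cls.length →
    (∀ i ∈ idxs, i < cls.length) →
    (∀ i, i < cls.length → ¬ pvSatP a' (cls.getD i []) →
        cnt.getD i 0 = (pvCnt a' (cls.getD i []) + idxs.count i : Int) ∧
        1 ≤ pvCnt a' (cls.getD i []) + idxs.count i) →
    (∀ i, i < cls.length → 1 ≤ cnt.getD i 0) →
    (∀ l ∈ app, pvForced cls |l| (decide (0 < l))) →
    (∀ i, i < cls.length → ¬ pvSatP a' (cls.getD i []) → pvCnt a' (cls.getD i []) = 1 →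
        idxs.count i = 0 → ∀ l ∈ cls.getD i [], a'.contains |l| = false → l ∈ app ∨ l ∈ rest) →
    ( (pvDec cls a' sat' cnt idxs app = none → ∃ cl ∈ cls, ∀ l ∈ cl, pvFals a' l) ∧
      (∀ cnt' app', pvDec cls a' sat' cnt idxs app = some (cnt', app') →
        cnt'.length = cls.length ∧
        (∀ i, i < cls.length → ¬ pvSatP a' (cls.getD i []) →
            cnt'.getD i 0 = (pvCnt a' (cls.getD i []) : Int) ∧ 1 ≤ pvCnt a' (cls.getD i [])) ∧
        (∀ i, i < cls.length → 1 ≤ cnt'.getD i 0) ∧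
        (∀ l ∈ app', pvForced cls |l| (decide (0 < l))) ∧
        (∀ i, i < cls.length → ¬ pvSatP a' (cls.getD i []) → pvCnt a' (cls.getD i []) = 1 →
            ∀ l ∈ cls.getD i [], a'.contains |l| = false → l ∈ app' ∨ l ∈ rest) ∧
        app'.length + (cnt'.map Int.toNat).sum ≤ app.length + (cnt.map Int.toNat).sum) ) := by
  intro idxs
  induction idxs with
  | nil =>
      intro cnt app hlenc hidx hp1 hpos happ hp4
      constructor
      · intro h; cases h
      · intro cnt' app' h
        simp only [pvDec, Option.some.injEq, Prod.mk.injEq] at h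
        obtain ⟨h1, h2⟩ := h
        subst h1; subst h2
        refine ⟨hlenc, ?_, hpos, happ, ?_, le_rfl⟩
        · intro i hi hns
          have := hp1 i hi hns
          simpa using this
        · intro i hi hns hcp
          exact hp4 i hi hns hcp (by simp)
  | cons i0 is ih =>
      intro cnt app hlenc hidx hp1 hpos happ hp4
      have hi0n : i0 < cls.length := hidx i0 List.mem_cons_self
      simp only [pvDec]
      by_cases hsi : sat'.getD i0 false = true
      · rw [if_pos hsi]
        have hsp : pvSatP a' (cls.getD i0 []) := (hsat i0 hi0n).mp hsi
        refine ih cnt app hlenc (fun i hi => hidx i (List.mem_cons_of_mem _ hi)) ?_ hpos happ ?_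
        · intro i hi hns
          have hne : i ≠ i0 := fun he => hns (he ▸ hsp)
          have hcc : (i0 :: is).count i = is.count i := by
            rw [List.count_cons]
            simp [Ne.symm hne]
          rw [← hcc]
          exact hp1 i hi hns
        · intro i hi hns hcp hc0
          have hne : i ≠ i0 := fun he => hns (he ▸ hsp)
          have hcc : (i0 :: is).count i = 0 := by
            rw [List.count_cons]
            simp [Ne.symm hne, hc0]
          exact hp4 i hi hns hcp hcc
      · rw [if_neg hsi]
        have hnsat : ¬ pvSatP a' (cls.getD i0 []) := fun hsp => hsi ((hsat i0 hi0n).mpr hsp)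
        set cp := pvCnt a' (cls.getD i0 []) with hcp_def
        set k' := is.count i0 with hk_def
        have hcnt0 : (i0 :: is).count i0 = k' + 1 := by
          rw [List.count_cons]; simp [hk_def]
        obtain ⟨hc0, -⟩ := hp1 i0 hi0n hnsat
        rw [hcnt0] at hc0
        have hceq : cnt.getD i0 0 - 1 = ((cp + k' : Nat) : Int) := by
          rw [hc0]; push_cast; ring
        have hilen : i0 < cnt.length := hlenc ▸ hi0n
        have hsum := pvSum_toNat_set cnt i0 (cnt.getD i0 0 - 1) hilen
        by_cases hcz : cnt.getD i0 0 - 1 = 0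
        · rw [if_pos hcz]
          have hcp0 : cp = 0 ∧ k' = 0 := by
            rw [hceq] at hcz
            constructor <;> omega
          constructor
          · intro _
            refine ⟨cls.getD i0 [], ?_, ?_⟩
            · rw [List.getD_eq_getElem cls [] hi0n]
              exact List.getElem_mem hi0n
            · intro l hl
              have hcl : a'.contains |l| = true := by
                by_contra hcf
                have h1 : 0 < pvCnt a' (cls.getD i0 []) := by
                  rw [show pvCnt a' (cls.getD i0 []) =
                      (cls.getD i0 []).countP (fun l => !(a'.contains |l|)) from rfl]
                  rw [List.countP_pos_iff]
                  exact ⟨l, hl, by simpa using hcf⟩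
                rw [← hcp_def] at h1
                omega
              exact pvFals_of a' l hcl (fun ht => hnsat ⟨l, hl, ht⟩)
          · intro cnt' app' h; cases h
        · rw [if_neg hcz]
          -- common new-counter facts
          have hlenc' : (cnt.set i0 (cnt.getD i0 0 - 1)).length = cls.length := by
            rw [List.length_set]; exact hlenc
          have hgset : (cnt.set i0 (cnt.getD i0 0 - 1)).getD i0 0 = ((cp + k' : Nat) : Int) := by
            rw [pvGetD_set_self _ _ _ hilen, hceq]
          have hgne : ∀ j, j ≠ i0 → (cnt.set i0 (cnt.getD i0 0 - 1)).getD j 0 = cnt.getD j 0 :=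
            fun j hj => pvGetD_set_ne _ _ _ _ hj
          have hckk : ¬ (cp + k' = 0) := by
            rw [hceq] at hcz
            intro hck
            exact hcz (by rw [hck]; rfl)
          have hpos' : ∀ i, i < cls.length → 1 ≤ (cnt.set i0 (cnt.getD i0 0 - 1)).getD i 0 := by
            intro i hi
            by_cases hii : i = i0
            · subst hii; rw [hgset]; omega
            · rw [hgne i hii]; exact hpos i hi
          have hp1' : ∀ i, i < cls.length → ¬ pvSatP a' (cls.getD i []) →
              (cnt.set i0 (cnt.getD i0 0 - 1)).getD i 0 =
                (pvCnt a' (cls.getD i []) + is.count i : Int) ∧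
              1 ≤ pvCnt a' (cls.getD i []) + is.count i := by
            intro i hi hns
            by_cases hii : i = i0
            · subst hii
              rw [hgset, ← hcp_def, ← hk_def]
              constructor
              · push_cast; ring
              · omega
            · rw [hgne i hii]
              have hcc : (i0 :: is).count i = is.count i := by
                rw [List.count_cons]; simp [Ne.symm hii]
              rw [← hcc]
              exact hp1 i hi hns
          have hsum' : ((cnt.set i0 (cnt.getD i0 0 - 1)).map Int.toNat).sum + 1 =
              (cnt.map Int.toNat).sum := by
            have h2 : (cnt.getD i0 0).toNat = cp + k' + 1 := by rw [hc0]; omega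
            have h3 : (cnt.getD i0 0 - 1).toNat = cp + k' := by rw [hceq]; omega
            omega
          by_cases hc1 : cnt.getD i0 0 - 1 = 1
          · rw [if_pos hc1]
            have hck1 : cp + k' = 1 := by
              rw [hceq] at hc1
              omega
            cases hf : (cls.getD i0 []).find? (fun l => !(a'.contains |l|)) with
            | some l0 =>
                have hpl0 : (!(a'.contains |l0|)) = true := by
                  have := List.find?_some hf
                  simpa using this
                have hml0 : l0 ∈ cls.getD i0 [] := List.mem_of_find?_eq_some hf
                have hcp1 : cp = 1 := by
                  have h1 : 0 < cp := by
                    rw [hcp_def, show pvCnt a' (cls.getD i0 []) =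
                        (cls.getD i0 []).countP (fun l => !(a'.contains |l|)) from rfl,
                      List.countP_pos_iff]
                    exact ⟨l0, hml0, hpl0⟩
                  omega
                have hk0 : k' = 0 := by omega
                -- l0 is forced
                have huniq := pvCountP_one_unique
                  (p := fun l => !(a'.contains |l|)) (cl := cls.getD i0 [])
                  (by rw [← hcp_def] at *; exact hcp1)
                have hfl0 : pvForced cls |l0| (decide (0 < l0)) := by
                  have hclm : cls.getD i0 [] ∈ cls := by
                    rw [List.getD_eq_getElem cls [] hi0n]
                    exact List.getElem_mem hi0n
                  have hcount : (cls.getD i0 []).count l0 = 1 := by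
                    have hle : (cls.getD i0 []).count l0 ≤ cp := by
                      rw [hcp_def]
                      unfold List.count
                      exact List.countP_mono_left (fun x hx hbx => by
                        have : x = l0 := by simpa using hbx
                        rw [this]; exact hpl0)
                    have hge : 1 ≤ (cls.getD i0 []).count l0 :=
                      List.one_le_count_iff.mpr hml0
                    omega
                  refine pvForced.intro _ l0 hclm hml0 hcount ?_
                  intro l hl hne
                  have hcl : a'.contains |l| = true := by
                    by_contra hcf
                    exact hne (huniq l hl (by simpa using hcf) l0 hml0 hpl0)
                  exact hsound _ _ (pvFals_of a' l hcl (fun ht => hnsat ⟨l, hl, ht⟩))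
                have := ih (cnt.set i0 (cnt.getD i0 0 - 1)) (app ++ [l0]) hlenc'
                  (fun i hi => hidx i (List.mem_cons_of_mem _ hi)) hp1' hpos'
                  (fun l hl => by
                    rcases List.mem_append.mp hl with h1 | h1
                    · exact happ l h1
                    · rw [List.mem_singleton.mp h1]; exact hfl0)
                  (by
                    intro i hi hns hcpi hci
                    by_cases hii : i = i0
                    · subst hii
                      intro l hl hcf
                      left
                      refine List.mem_append.mpr (Or.inr (List.mem_singleton.mpr ?_))
                      exact huniq l hl (by simpa using hcf) l0 hml0 hpl0
                    · have hcc : (i0 :: is).count i = 0 := by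
                        rw [List.count_cons]; simp [Ne.symm hii, hci]
                      intro l hl hcf
                      rcases hp4 i hi hns hcpi hcc l hl hcf with h1 | h1
                      · exact Or.inl (List.mem_append.mpr (Or.inl h1))
                      · exact Or.inr h1)
                refine ⟨this.1, ?_⟩
                intro cnt' app' h
                obtain ⟨q1, q2, q3, q4, q5, q6⟩ := this.2 cnt' app' h
                refine ⟨q1, q2, q3, q4, q5, ?_⟩
                rw [List.length_append] at q6
                simp only [List.length_singleton] at q6
                omega
            | none =>
                have hcp0 : cp = 0 := by
                  rw [hcp_def, show pvCnt a' (cls.getD i0 []) =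
                      (cls.getD i0 []).countP (fun l => !(a'.contains |l|)) from rfl,
                    List.countP_eq_zero]
                  intro l hl
                  have := List.find?_eq_none.mp hf l hl
                  simpa using this
                have hk1 : k' = 1 := by omega
                have := ih (cnt.set i0 (cnt.getD i0 0 - 1)) app hlenc'
                  (fun i hi => hidx i (List.mem_cons_of_mem _ hi)) hp1' hpos' happ
                  (by
                    intro i hi hns hcpi hci
                    by_cases hii : i = i0
                    · subst hii
                      rw [← hk_def] at hci
                      omega
                    · have hcc : (i0 :: is).count i = 0 := by
                        rw [List.count_cons]; simp [Ne.symm hii, hci]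
                      exact hp4 i hi hns hcpi hcc)
                refine ⟨this.1, ?_⟩
                intro cnt' app' h
                obtain ⟨q1, q2, q3, q4, q5, q6⟩ := this.2 cnt' app' h
                exact ⟨q1, q2, q3, q4, q5, by omega⟩
          · rw [if_neg hc1]
            have hck2 : 2 ≤ cp + k' := by
              rw [hceq] at hc1 hcz
              omega
            have := ih (cnt.set i0 (cnt.getD i0 0 - 1)) app hlenc'
              (fun i hi => hidx i (List.mem_cons_of_mem _ hi)) hp1' hpos' happ
              (by
                intro i hi hns hcpi hci
                by_cases hii : i = i0
                · subst hii
                  rw [← hcp_def] at hcpi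
                  rw [← hk_def] at hci
                  omega
                · have hcc : (i0 :: is).count i = 0 := by
                    rw [List.count_cons]; simp [Ne.symm hii, hci]
                  exact hp4 i hi hns hcpi hcc)
            refine ⟨this.1, ?_⟩
            intro cnt' app' h
            obtain ⟨q1, q2, q3, q4, q5, q6⟩ := this.2 cnt' app' h
            exact ⟨q1, q2, q3, q4, q5, by omega⟩

-- ---------- the queue-step lemma ----------

theorem pvStep_assign (cls : List (List Int)) (occ : PySem.Dict Int (List Nat))
    (hocc : pvOccSpec cls occ) (a : PySem.Dict Int Bool) (sat : List Bool) (cnt : List Int)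
    (u : Int) (rest : List Int) (hinv : pvQInv cls a sat cnt (u :: rest))
    (hg : a.get? |u| = none) :
    (pvDec cls (a.insert |u| (decide (0 < u))) ((occ.getD u []).foldl (fun s i => s.set i true) sat)
        cnt (occ.getD (-u) []) [] = none →
      ∃ cl ∈ cls, ∀ l ∈ cl, pvFals (a.insert |u| (decide (0 < u))) l) ∧
    (∀ cnt' app, pvDec cls (a.insert |u| (decide (0 < u))) ((occ.getD u []).foldl (fun s i => s.set i true) sat)
        cnt (occ.getD (-u) []) [] = some (cnt', app) →
      pvQInv cls (a.insert |u| (decide (0 < u))) ((occ.getD u []).foldl (fun s i => s.set i true) sat)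
        cnt' (rest ++ app) ∧ pvM cnt' (rest ++ app) < pvM cnt (u :: rest)) := by
  obtain ⟨hls, hlc, hsnd, hst, hcn, hps, hpd, hut⟩ := hinv
  have hfu : pvForced cls |u| (decide (0 < u)) := hpd u List.mem_cons_self
  have hsound' : pvSound cls (a.insert |u| (decide (0 < u))) := by
    intro v b hv
    rw [PySem.Dict.get?_insert] at hv
    by_cases hvu : v = |u|
    · rw [if_pos hvu] at hv
      injection hv with hv
      rw [hvu, ← hv]
      exact hfu
    · rw [if_neg hvu] at hv
      exact hsnd v b hv
  have hlen_s' : ((occ.getD u []).foldl (fun s i => s.set i true) sat).length = cls.length := by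
    rw [pvFoldl_set_true_len]; exact hls
  have hmemocc : ∀ (l : Int) (i : Nat), i < cls.length →
      (i ∈ occ.getD l [] ↔ l ∈ cls.getD i []) := by
    intro l i hi
    constructor
    · intro hm
      have h1 : 0 < (occ.getD l []).count i := List.count_pos_iff.mpr hm
      rw [(hocc l).2 i hi] at h1
      exact List.count_pos_iff.mp h1
    · intro hm
      have h1 : 0 < (cls.getD i []).count l := List.count_pos_iff.mpr hm
      rw [← (hocc l).2 i hi] at h1
      exact List.count_pos_iff.mp h1
  have hsat' : ∀ i, i < cls.length →
      (((occ.getD u []).foldl (fun s i => s.set i true) sat).getD i false = true ↔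
        pvSatP (a.insert |u| (decide (0 < u))) (cls.getD i [])) := by
    intro i hi
    rw [pvFoldl_set_true_getD _ _ _ (by rw [hls]; exact hi)]
    rw [pvSatP_insert a u _ hg]
    rw [Bool.or_eq_true]
    rw [hst i hi]
    rw [decide_eq_true_iff]
    rw [hmemocc u i hi]
  have hmono : ∀ i, i < cls.length →
      ¬ pvSatP (a.insert |u| (decide (0 < u))) (cls.getD i []) →
      ¬ pvSatP a (cls.getD i []) ∧ u ∉ cls.getD i [] := by
    intro i hi hns
    constructor
    · exact fun hsp => hns ((pvSatP_insert a u _ hg).mpr (Or.inl hsp))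
    · exact fun hm => hns ((pvSatP_insert a u _ hg).mpr (Or.inr hm))
  have hidx : ∀ i ∈ occ.getD (-u) [], i < cls.length := (hocc (-u)).1
  have hp1 : ∀ i, i < cls.length →
      ¬ pvSatP (a.insert |u| (decide (0 < u))) (cls.getD i []) →
      cnt.getD i 0 = (pvCnt (a.insert |u| (decide (0 < u))) (cls.getD i []) +
        (occ.getD (-u) []).count i : Int) ∧
      1 ≤ pvCnt (a.insert |u| (decide (0 < u))) (cls.getD i []) + (occ.getD (-u) []).count i := by
    intro i hi hns
    obtain ⟨hnsa, hnu⟩ := hmono i hi hns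
    obtain ⟨h1, h2⟩ := hcn i hi hnsa
    have h3 := pvCnt_insert a u (cls.getD i []) hg hnu
    rw [(hocc (-u)).2 i hi, ← h3]
    exact ⟨by rw [h1]; omega, by omega⟩
  have hp4 : ∀ i, i < cls.length →
      ¬ pvSatP (a.insert |u| (decide (0 < u))) (cls.getD i []) →
      pvCnt (a.insert |u| (decide (0 < u))) (cls.getD i []) = 1 →
      (occ.getD (-u) []).count i = 0 →
      ∀ l ∈ cls.getD i [], (a.insert |u| (decide (0 < u))).contains |l| = false →
        l ∈ ([] : List Int) ∨ l ∈ rest := by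
    intro i hi hns hcp hci l hl hcf
    obtain ⟨hnsa, hnu⟩ := hmono i hi hns
    have hcf' : a.contains |l| = false ∧ |l| ≠ |u| := by
      rw [PySem.Dict.contains_insert, Bool.or_eq_false_iff] at hcf
      exact ⟨hcf.2, by simpa using hcf.1⟩
    have hcnta : pvCnt a (cls.getD i []) = 1 := by
      have h3 := pvCnt_insert a u (cls.getD i []) hg hnu
      rw [(hocc (-u)).2 i hi] at hci
      omega
    have := hut i hi hnsa hcnta l hl hcf'.1
    rcases List.mem_cons.mp this with rfl | hm
    · exact absurd rfl hcf'.2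
    · exact Or.inr hm
  have hspec := pvDec_spec cls (a.insert |u| (decide (0 < u)))
    ((occ.getD u []).foldl (fun s i => s.set i true) sat) rest hlen_s' hsat' hsound'
    (occ.getD (-u) []) cnt [] hlc hidx hp1 hps (fun l hl => absurd hl (by simp)) hp4
  refine ⟨hspec.1, ?_⟩
  intro cnt' app hd
  obtain ⟨q1, q2, q3, q4, q5, q6⟩ := hspec.2 cnt' app hd
  refine ⟨⟨hlen_s', q1, hsound', hsat', q2, q3, ?_, ?_⟩, ?_⟩
  · intro x hx
    rcases List.mem_append.mp hx with h1 | h1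
    · exact hpd x (List.mem_cons_of_mem _ h1)
    · exact q4 x h1
  · intro i hi hns hcp l hl hcf
    rcases q5 i hi hns hcp l hl hcf with h1 | h1
    · exact List.mem_append.mpr (Or.inr h1)
    · exact List.mem_append.mpr (Or.inl h1)
  · simp only [List.length_nil] at q6
    simp only [pvM, List.length_append, List.length_cons]
    omega

theorem pvQLoop_some (cls : List (List Int)) (occ : PySem.Dict Int (List Nat))
    (hocc : pvOccSpec cls occ) :
    ∀ (fuel : Nat) (a : PySem.Dict Int Bool) (sat : List Bool) (cnt pending : List Int)
      (aF : PySem.Dict Int Bool),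
    pvQLoop cls occ fuel a sat cnt pending = some aF → pvQInv cls a sat cnt pending →
    pvSound cls aF ∧ pvClosed cls aF := by
  intro fuel
  induction fuel with
  | zero => intro a sat cnt pending aF h; cases h
  | succ fuel ih =>
      intro a sat cnt pending aF h hinv
      cases pending with
      | nil =>
          injection h with h
          subst h
          obtain ⟨hls, hlc, hsnd, hst, hcn, hps, hpd, hut⟩ := hinv
          refine ⟨hsnd, ?_⟩
          intro cl hcl
          obtain ⟨i, hi, rfl⟩ := List.mem_iff_getElem.mp hcl
          rw [← List.getD_eq_getElem cls [] hi]
          cases hsi : sat.getD i false with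
          | true => exact Or.inl ((hst i hi).mp hsi)
          | false =>
              have hns : ¬ pvSatP a (cls.getD i []) := fun hsp => by
                rw [(hst i hi).mpr hsp] at hsi; cases hsi
              obtain ⟨-, h2⟩ := hcn i hi hns
              right
              rcases Nat.lt_or_ge (pvCnt a (cls.getD i [])) 2 with hlt | hge
              · exfalso
                have hc1 : pvCnt a (cls.getD i []) = 1 := by omega
                obtain ⟨l, hl, hpl⟩ := List.countP_pos_iff.mp
                  (show 0 < (cls.getD i []).countP (fun l => !(a.contains |l|)) by
                    rw [show (cls.getD i []).countP (fun l => !(a.contains |l|)) =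
                        pvCnt a (cls.getD i []) from rfl, hc1]; omega)
                exact absurd (hut i hi hns hc1 l hl (by simpa using hpl)) (by simp)
              · exact hge
      | cons u rest =>
          simp only [pvQLoop] at h
          cases hg : a.get? |u| with
          | some w =>
              rw [hg] at h; simp only [] at h
              by_cases hw : w ≠ decide (0 < u)
              · simp [hw] at h
              · rw [if_neg (by simpa using hw)] at h
                obtain ⟨hls, hlc, hsnd, hst, hcn, hps, hpd, hut⟩ := hinv
                refine ih a sat cnt rest aF h ⟨hls, hlc, hsnd, hst, hcn, hps,
                  fun x hx => hpd x (List.mem_cons_of_mem _ hx), ?_⟩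
                intro i hi hns hcp l hl hcf
                have := hut i hi hns hcp l hl hcf
                rcases List.mem_cons.mp this with rfl | hm
                · exfalso
                  have : a.contains |l| = true := by
                    rw [PySem.Dict.contains_eq_isSome_get?, hg]; rfl
                  rw [this] at hcf; cases hcf
                · exact hm
          | none =>
              rw [hg] at h; simp only [] at h
              cases hd : pvDec cls (a.insert |u| (decide (0 < u)))
                  ((occ.getD u []).foldl (fun s i => s.set i true) sat) cnt
                  (occ.getD (-u) []) [] with
              | none => rw [hd] at h; cases h
              | some p =>
                  obtain ⟨cnt', app⟩ := p
                  rw [hd] at h; simp only [] at h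
                  obtain ⟨hinv', -⟩ :=
                    (pvStep_assign cls occ hocc a sat cnt u rest hinv hg).2 cnt' app hd
                  exact ih _ _ _ _ aF h hinv'

theorem pvQLoop_total (cls : List (List Int)) (occ : PySem.Dict Int (List Nat))
    (hocc : pvOccSpec cls occ) (hok : pvOk cls) :
    ∀ (fuel : Nat) (a : PySem.Dict Int Bool) (sat : List Bool) (cnt pending : List Int),
    pvQInv cls a sat cnt pending → pvM cnt pending < fuel →
    ∃ aF, pvQLoop cls occ fuel a sat cnt pending = some aF := by
  intro fuel
  induction fuel with
  | zero => intro a sat cnt pending _ hM; exact absurd hM (Nat.not_lt_zero _)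
  | succ fuel ih =>
      intro a sat cnt pending hinv hM
      cases pending with
      | nil => exact ⟨a, rfl⟩
      | cons u rest =>
          cases hg : a.get? |u| with
          | some w =>
              have hw : w = decide (0 < u) := by
                obtain ⟨-, -, hsnd, -, -, -, hpd, -⟩ := hinv
                exact hok.1 |u| w (decide (0 < u)) (hsnd _ _ hg)
                  (hpd u List.mem_cons_self)
              obtain ⟨hls, hlc, hsnd, hst, hcn, hps, hpd, hut⟩ := hinv
              have hinv' : pvQInv cls a sat cnt rest := by
                refine ⟨hls, hlc, hsnd, hst, hcn, hps,
                  fun x hx => hpd x (List.mem_cons_of_mem _ hx), ?_⟩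
                intro i hi hns hcp l hl hcf
                have := hut i hi hns hcp l hl hcf
                rcases List.mem_cons.mp this with rfl | hm
                · exfalso
                  have : a.contains |l| = true := by
                    rw [PySem.Dict.contains_eq_isSome_get?, hg]; rfl
                  rw [this] at hcf; cases hcf
                · exact hm
              obtain ⟨aF, hF⟩ := ih a sat cnt rest hinv'
                (by simp only [pvM, List.length_cons] at hM ⊢; omega)
              refine ⟨aF, ?_⟩
              simp only [pvQLoop, hg]
              rw [if_neg (by simp [hw])]
              exact hF
          | none =>
              have hstep := pvStep_assign cls occ hocc a sat cnt u rest hinv hg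
              cases hd : pvDec cls (a.insert |u| (decide (0 < u)))
                  ((occ.getD u []).foldl (fun s i => s.set i true) sat) cnt
                  (occ.getD (-u) []) [] with
              | none =>
                  exfalso
                  obtain ⟨cl, hcl, hfall⟩ := hstep.1 hd
                  have hsound' : pvSound cls (a.insert |u| (decide (0 < u))) := by
                    obtain ⟨-, -, hsnd, -, -, -, hpd, -⟩ := hinv
                    intro v b hv
                    rw [PySem.Dict.get?_insert] at hv
                    by_cases hvu : v = |u|
                    · rw [if_pos hvu] at hv
                      injection hv with hv
                      rw [hvu, ← hv]
                      exact hpd u List.mem_cons_self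
                    · rw [if_neg hvu] at hv
                      exact hsnd v b hv
                  exact hok.2 cl hcl (fun l hl => hsound' _ _ (hfall l hl))
              | some p =>
                  obtain ⟨cnt', app⟩ := p
                  obtain ⟨hinv', hMdec⟩ := hstep.2 cnt' app hd
                  obtain ⟨aF, hF⟩ := ih _ _ _ _ hinv' (by omega)
                  refine ⟨aF, ?_⟩
                  simp only [pvQLoop, hg, hd]
                  exact hF

-- ---------- entry states ----------

theorem pvQInv_init (cls : List (List Int)) (hne : ∀ cl ∈ cls, cl ≠ []) :
    pvQInv cls PySem.Dict.empty (List.replicate cls.length false)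
      (cls.map (fun cl => (cl.length : Int)))
      ((cls.filter (fun cl => cl.length = 1)).map (fun cl => cl.headI)) := by
  have hsound : pvSound cls PySem.Dict.empty := by
    intro v b h
    rw [PySem.Dict.get?_empty] at h
    cases h
  have hnosat : ∀ cl : List Int, ¬ pvSatP PySem.Dict.empty cl := by
    rintro cl ⟨l, hl, ht⟩
    rw [show pvTrue PySem.Dict.empty l ↔
        PySem.Dict.empty.get? |l| = some (decide (0 < l)) from Iff.rfl,
      PySem.Dict.get?_empty] at ht
    cases ht
  have hcnt_eq : ∀ cl : List Int, pvCnt PySem.Dict.empty cl = cl.length := by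
    intro cl
    rw [show pvCnt PySem.Dict.empty cl =
        cl.countP (fun l => !(PySem.Dict.empty.contains |l|)) from rfl]
    rw [List.countP_congr (q := fun _ => true)
      (fun l _ => by simp [PySem.Dict.contains_empty])]
    exact congrFun List.countP_true cl
  have hgetcnt : ∀ i, i < cls.length →
      (cls.map (fun cl => (cl.length : Int))).getD i 0 = ((cls.getD i []).length : Int) := by
    intro i hi
    rw [List.getD_eq_getElem?_getD, List.getElem?_map,
      List.getElem?_eq_getElem hi, List.getD_eq_getElem cls [] hi]
    rfl
  have hlen_pos : ∀ i, i < cls.length → 1 ≤ (cls.getD i []).length := by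
    intro i hi
    have hmem : cls.getD i [] ∈ cls := by
      rw [List.getD_eq_getElem cls [] hi]; exact List.getElem_mem hi
    have : (cls.getD i []).length ≠ 0 :=
      fun h0 => hne _ hmem (List.length_eq_zero_iff.mp h0)
    omega
  refine ⟨by simp, by simp, hsound, ?_, ?_, ?_, ?_, ?_⟩
  · intro i hi
    have hrep : (List.replicate cls.length false).getD i false = false := by
      rw [List.getD_eq_getElem?_getD, List.getElem?_replicate]
      split <;> rfl
    rw [hrep]
    constructor
    · intro h; cases h
    · intro h; exact absurd h (hnosat _)
  · intro i hi hns
    rw [hgetcnt i hi, hcnt_eq]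
    exact ⟨rfl, hlen_pos i hi⟩
  · intro i hi
    rw [hgetcnt i hi]
    have := hlen_pos i hi
    omega
  · intro x hx
    obtain ⟨cl, hclf, rfl⟩ := List.mem_map.mp hx
    obtain ⟨hclm, hcl1⟩ := List.mem_filter.mp hclf
    have hlen1 : cl.length = 1 := by simpa using hcl1
    obtain ⟨y, rfl⟩ := List.length_eq_one_iff.mp hlen1
    simp only [List.headI]
    exact pvForced.intro [y] y hclm (List.mem_singleton.mpr rfl) (by simp)
      (fun l hl hlne => absurd (List.mem_singleton.mp hl) hlne)
  · intro i hi hns hcp l hl hcf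
    rw [hcnt_eq] at hcp
    have hmem : cls.getD i [] ∈ cls := by
      rw [List.getD_eq_getElem cls [] hi]; exact List.getElem_mem hi
    obtain ⟨y, hy⟩ := List.length_eq_one_iff.mp hcp
    rw [hy] at hl
    have hly : l = y := List.mem_singleton.mp hl
    refine List.mem_map.mpr ⟨cls.getD i [], List.mem_filter.mpr ⟨hmem, by simpa using hcp⟩, ?_⟩
    rw [hy, hly]
    rfl

-- ===== VERDICT (by name: the statement is the Claim_ definition above) =====
theorem unit_propagate_fixpoint_spec : Claim_equal_unit_propagate_fixpoint := by
  intro clauses _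
  unfold Spec_unit_propagate_fixpoint unit_propagate_fixpoint unit_propagate_fixpoint_alt
  rw [pvSim clauses (clauses.flatten.length + 1) clauses PySem.Dict.empty rfl]
  cases hb : pvBuild clauses 0 PySem.Dict.empty [] [] with
  | none =>
      have hmem := pvBuild_none clauses 0 PySem.Dict.empty [] [] hb
      have hsn : pvSurv PySem.Dict.empty clauses = none := pvSurv_nil_mem _ clauses hmem
      have hrl : pvRLoop clauses (clauses.flatten.length + 1) PySem.Dict.empty = none := by
        simp only [pvRLoop, hsn]
      rw [hrl]
  | some t =>
      obtain ⟨occ, cnts, queue⟩ := t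
      obtain ⟨ho, hc, hq, hne⟩ :=
        pvBuild_spec clauses 0 PySem.Dict.empty [] [] occ cnts queue hb
      have hocc : pvOccSpec clauses occ := by
        intro l
        have hol : occ.getD l [] = pvOccAt l clauses 0 := by
          rw [ho l, PySem.Dict.getD_empty, List.nil_append]
        constructor
        · intro i hm
          rw [hol] at hm
          have := pvOccAt_mem l clauses 0 i hm
          omega
        · intro i hi
          rw [hol]
          have := pvOccAt_count l clauses 0 i hi
          simpa using this
      have hc' : cnts = clauses.map (fun cl => (cl.length : Int)) := by
        rw [hc, List.nil_append]
      have hq' : queue = (clauses.filter (fun cl => cl.length = 1)).map (fun cl => cl.headI) := by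
        rw [hq, List.nil_append]
      have hinv0 : pvQInv clauses PySem.Dict.empty (List.replicate clauses.length false)
          cnts queue := by
        rw [hc', hq']
        exact pvQInv_init clauses hne
      have hM0 : pvM cnts queue < clauses.length + clauses.flatten.length + 1 := by
        have h1 : ((clauses.map (fun cl => (cl.length : Int))).map Int.toNat).sum =
            clauses.flatten.length := by
          rw [List.map_map]
          have h2 : (Int.toNat ∘ fun cl : List Int => (cl.length : Int)) =
              fun cl : List Int => cl.length := by
            funext cl; simp
          rw [h2]
          exact List.length_flatten.symm
        have h3 : ((clauses.filter (fun cl => cl.length = 1)).map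
            (fun cl => cl.headI)).length ≤ clauses.length := by
          rw [List.length_map]
          exact List.length_filter_le _ _
        simp only [pvM]
        rw [hc', hq']
        omega
      cases hql : pvQLoop clauses occ (clauses.length + clauses.flatten.length + 1)
          PySem.Dict.empty (List.replicate clauses.length false) cnts queue with
      | some aQ =>
          obtain ⟨hsQ, hclQ⟩ := pvQLoop_some clauses occ hocc _ _ _ _ _ aQ hql hinv0
          have hcQ := pvClosed_complete clauses aQ hclQ
          have hok := pvOk_of clauses aQ hcQ hclQ
          have hsE : pvSound clauses PySem.Dict.empty := fun v b h => by
            rw [PySem.Dict.get?_empty] at h; cases h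
          obtain ⟨aR, hR⟩ := pvRLoop_total clauses hok (clauses.flatten.length + 1)
            PySem.Dict.empty hsE
            (by rw [PySem.Dict.keys_empty]; exact List.nodup_nil)
            (by rw [PySem.Dict.keys_empty]; intro k hk; cases hk)
            (by rw [PySem.Dict.size_empty, List.length_map]; omega)
          obtain ⟨hsR, hclR⟩ := pvRLoop_some clauses _ _ aR hR hsE
          have hcR := pvClosed_complete clauses aR hclR
          have hag := pvAgree clauses aR aQ hsR hcR hsQ hcQ
          rw [hR]
          simp only [hql]
          congr 1
          refine List.filterMap_congr ?_
          intro cl _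
          rw [pvRedB_nil, pvRedB_nil, pvRedL_congr aR aQ hag]
      | none =>
          cases hR : pvRLoop clauses (clauses.flatten.length + 1) PySem.Dict.empty with
          | none => simp only [hql]
          | some aR =>
              exfalso
              have hsE : pvSound clauses PySem.Dict.empty := fun v b h => by
                rw [PySem.Dict.get?_empty] at h; cases h
              obtain ⟨hsR, hclR⟩ := pvRLoop_some clauses _ _ aR hR hsE
              have hcR := pvClosed_complete clauses aR hclR
              have hok := pvOk_of clauses aR hcR hclR
              obtain ⟨aF, hF⟩ := pvQLoop_total clauses occ hocc hok
                (clauses.length + clauses.flatten.length + 1) PySem.Dict.empty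
                (List.replicate clauses.length false) cnts queue hinv0 hM0
              rw [hql] at hF
              cases hF
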